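-- pv_equiv track=rewrite | github.com/adaniarov/bootcamp-lamoda | src/preprocessing.py | prepare_reviews
-- ===== SOURCE A (Python) =====
-- from typing import List
--
-- def prepare_reviews(
--     reviews: List[str],
--     max_chars: int = 500,
--     max_reviews: int = 50,
--     min_review_length: int = 10,
-- ) -> List[str]:
--     """
--     Подготавливает отзывы для обработки.
--
--     Выполняет следующие операции:
--     - Обрезает каждый отзыв до max_chars символов
--     - Берет не более max_reviews отзывов
--     - Удаляет пустые и слишком короткие отзывы
--
--     Args:
--         reviews: Список исходных отзывов.
--         max_chars: Максимальная длина отзыва в символах. По умолчанию 500.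
--         max_reviews: Максимальное количество отзывов для обработки. По умолчанию 50.
--         min_review_length: Минимальная длина отзыва для включения. По умолчанию 10.
--
--     Returns:
--         Список обработанных отзывов.
--
--     Examples:
--         >>> reviews = ["Очень хороший товар!", "Плохо", "Отличное качество"]
--         >>> prepare_reviews(reviews, max_chars=20, max_reviews=2, min_review_length=5)
--         ['Очень хороший товар!', 'Отличное качество']
--     """
--     if not reviews:
--         return []
--
--     # Удаляем пустые и слишком короткие отзывы
--     filtered_reviews = [
--         review.strip()
--         for review in reviews
--         if review and isinstance(review, str) and len(review.strip()) >= min_review_length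
--     ]
--
--     if not filtered_reviews:
--         return []
--
--     # Обрезаем каждый отзыв до max_chars символов
--     truncated_reviews = [review[:max_chars] for review in filtered_reviews]
--
--     # Берем не более max_reviews отзывов
--     result = truncated_reviews[:max_reviews]
--
--     return result
-- ===== SOURCE B (Python) =====
-- from typing import List
--
-- def prepare_reviews(
--     reviews: List[str],
--     max_chars: int = 500,
--     max_reviews: int = 50,
--     min_review_length: int = 10,
-- ) -> List[str]:
--     result = []
--     for review in reviews:
--         if len(result) >= max_reviews:
--             break
--         if review and isinstance(review, str):
--             stripped = review.strip()
--             if len(stripped) >= min_review_length: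
--                 result.append(stripped[:max_chars])
--     return result
-- ===== Notes on version B (the rewrite author's own statement) =====
-- stated objective: simpler
-- what changed: Replaces A's three separate list passes (filter+strip comprehension, truncate comprehension, final slice) plus two early-return guards by one single-pass loop with an accumulator that breaks as soon as max_reviews results are collected.
-- outside the precondition, e.g. on prepare_reviews(['hello world!!', 'another long review'], 500, -1, 3): A returns ['hello world!!'], B returns []
import Mathlib
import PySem

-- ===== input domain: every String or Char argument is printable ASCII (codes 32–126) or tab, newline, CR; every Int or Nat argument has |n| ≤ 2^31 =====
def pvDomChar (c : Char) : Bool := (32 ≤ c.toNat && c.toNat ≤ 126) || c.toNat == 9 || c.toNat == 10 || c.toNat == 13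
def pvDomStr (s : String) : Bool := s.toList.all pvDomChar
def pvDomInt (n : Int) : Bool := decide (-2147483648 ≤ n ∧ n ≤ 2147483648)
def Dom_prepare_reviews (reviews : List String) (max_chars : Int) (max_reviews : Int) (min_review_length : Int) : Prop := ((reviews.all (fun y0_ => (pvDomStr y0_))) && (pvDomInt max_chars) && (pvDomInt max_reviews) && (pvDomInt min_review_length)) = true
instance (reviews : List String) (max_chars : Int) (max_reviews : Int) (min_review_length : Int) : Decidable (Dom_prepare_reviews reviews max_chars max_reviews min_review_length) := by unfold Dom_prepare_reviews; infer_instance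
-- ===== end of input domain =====

-- B replaces A's three list passes (filter+strip, truncate, cap slice) by one single-pass
-- accumulator loop that stops as soon as max_reviews results are collected (objective: simpler).


-- ===== PORT A =====
def prepare_reviews (reviews : List String) (max_chars : Int) (max_reviews : Int) (min_review_length : Int) : List String :=
  if reviews = [] then []
  else
    let filtered := reviews.filterMap (fun review =>
      if review ≠ "" ∧ min_review_length ≤ PySem.Str.len (PySem.Str.strip review)
      then some (PySem.Str.strip review) else none)
    if filtered = [] then []
    else
      let truncated := filtered.map (fun review => PySem.Str.slice review none (some max_chars))
      PySem.List.slice truncated none (some max_reviews)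

-- ===== PORT B =====
def pvGoB (max_chars max_reviews min_review_length : Int) (acc : List String) : List String → List String
  | [] => acc.reverse
  | review :: rest =>
    if max_reviews ≤ (acc.length : Int) then acc.reverse
    else if review ≠ "" then
      let stripped := PySem.Str.strip review
      if min_review_length ≤ PySem.Str.len stripped then
        pvGoB max_chars max_reviews min_review_length (PySem.Str.slice stripped none (some max_chars) :: acc) rest
      else pvGoB max_chars max_reviews min_review_length acc rest
    else pvGoB max_chars max_reviews min_review_length acc rest

def prepare_reviews_alt (reviews : List String) (max_chars : Int) (max_reviews : Int) (min_review_length : Int) : List String :=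
  pvGoB max_chars max_reviews min_review_length [] reviews

-- ===== PRECONDITION & SPEC =====
-- Pre_ restricts to the natural domain of a count cap: it excludes negative max_reviews, on which
-- A's final slice truncated[:max_reviews] drops elements from the END (a Python negative-slice
-- artefact) while B's loop naturally returns an empty list.
def Pre_prepare_reviews (reviews : List String) (max_chars : Int) (max_reviews : Int) (min_review_length : Int) : Prop := 0 ≤ max_reviews
instance (reviews : List String) (max_chars : Int) (max_reviews : Int) (min_review_length : Int) : Decidable (Pre_prepare_reviews reviews max_chars max_reviews min_review_length) := by unfold Pre_prepare_reviews; infer_instance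
def pvWitness_prepare_reviews : List String × Int × Int × Int := ([" hello world ", "no"], 5, 3, 4)

def Spec_prepare_reviews (reviews : List String) (max_chars : Int) (max_reviews : Int) (min_review_length : Int) (out : List String) : Prop := out = prepare_reviews_alt reviews max_chars max_reviews min_review_length
instance (reviews : List String) (max_chars : Int) (max_reviews : Int) (min_review_length : Int) (out : List String) : Decidable (Spec_prepare_reviews reviews max_chars max_reviews min_review_length out) := by unfold Spec_prepare_reviews; infer_instance

-- ===== CLAIM (what is proved, stated in full; the proofs are below) =====
def Claim_equal_prepare_reviews : Prop := ∀ (reviews : List String) (max_chars : Int) (max_reviews : Int) (min_review_length : Int), Dom_prepare_reviews reviews max_chars max_reviews min_review_length → Pre_prepare_reviews reviews max_chars max_reviews min_review_length → Spec_prepare_reviews reviews max_chars max_reviews min_review_length (prepare_reviews reviews max_chars max_reviews min_review_length)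

-- ===== LEMMAS AND PROOFS =====

-- the per-review result B produces (kept / dropped), used to state the loop invariant
def pvKeep (max_chars min_review_length : Int) (review : String) : Option String :=
  if review ≠ "" ∧ min_review_length ≤ PySem.Str.len (PySem.Str.strip review)
  then some (PySem.Str.slice (PySem.Str.strip review) none (some max_chars)) else none

-- loop invariant for B's accumulator loop
theorem pvGoB_eq (mc mr ml : Int) (l : List String) : ∀ (acc : List String),
    pvGoB mc mr ml acc l = acc.reverse ++ (l.filterMap (pvKeep mc ml)).take (mr - acc.length).toNat := by
  induction l with
  | nil => intro acc; simp [pvGoB]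
  | cons review rest ih =>
    intro acc
    simp only [pvGoB]
    by_cases hbr : mr ≤ (acc.length : Int)
    · have h0 : (mr - acc.length).toNat = 0 := by omega
      rw [if_pos hbr, h0]
      simp
    · rw [if_neg hbr]
      by_cases hne : review ≠ ""
      · rw [if_pos hne]
        by_cases hlen : ml ≤ PySem.Str.len (PySem.Str.strip review)
        · have hk : pvKeep mc ml review
              = some (PySem.Str.slice (PySem.Str.strip review) none (some mc)) := by
            rw [pvKeep, if_pos ⟨hne, hlen⟩]
          have ht : (mr - acc.length).toNat = ((mr - ((acc.length : Int) + 1)).toNat) + 1 := by omega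
          rw [if_pos hlen, ih, List.filterMap_cons, hk]
          simp only [List.reverse_cons, List.length_cons, Nat.cast_add, Nat.cast_one]
          rw [ht, List.take_succ_cons]
          simp
        · have hk : pvKeep mc ml review = none := by
            rw [pvKeep, if_neg (fun h => hlen h.2)]
          rw [if_neg hlen, ih, List.filterMap_cons, hk]
      · have hk : pvKeep mc ml review = none := by
          rw [pvKeep, if_neg (fun h => hne h.1)]
        rw [if_neg hne, ih, List.filterMap_cons, hk]

theorem pvA_eq (reviews : List String) (mc mr ml : Int) (hmr : 0 ≤ mr) :
    prepare_reviews reviews mc mr ml = (reviews.filterMap (pvKeep mc ml)).take mr.toNat := by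
  unfold prepare_reviews
  by_cases hrev : reviews = []
  · simp [hrev]
  · simp only [hrev, if_false]
    have hmap : (reviews.filterMap (fun review =>
        if review ≠ "" ∧ ml ≤ PySem.Str.len (PySem.Str.strip review)
        then some (PySem.Str.strip review) else none)).map
          (fun review => PySem.Str.slice review none (some mc))
        = reviews.filterMap (pvKeep mc ml) := by
      rw [List.map_filterMap]
      apply List.filterMap_congr
      intro review _
      by_cases h : review ≠ "" ∧ ml ≤ PySem.Str.len (PySem.Str.strip review) <;>
        simp [pvKeep, h]
    by_cases hf : reviews.filterMap (fun review =>
        if review ≠ "" ∧ ml ≤ PySem.Str.len (PySem.Str.strip review)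
        then some (PySem.Str.strip review) else none) = []
    · simp only [hf, if_true]
      rw [← hmap, hf]
      simp
    · simp only [hf, if_false]
      rw [PySem.List.slice_to _ hmr, hmap]

-- ===== VERDICT (by name: the statement is the Claim_ definition above) =====
theorem prepare_reviews_spec : Claim_equal_prepare_reviews := by
  intro reviews mc mr ml _ hpre
  unfold Spec_prepare_reviews prepare_reviews_alt
  rw [pvGoB_eq, pvA_eq reviews mc mr ml hpre]
  simp
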